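-- pv_equiv track=rewrite | github.com/bunjakurina/AIN_TV_Program_Neighbor_Analysis | neighbor_engine.py | compute_advanced_delta_neighbors
-- ===== SOURCE A (Python) =====
-- from bisect import bisect_left, bisect_right
-- from typing import Any, Dict, List, Sequence, Tuple
--
-- def compute_advanced_delta_neighbors(
--     programs: List[Dict[str, Any]],
--     starts: Sequence[int],
--     delta: int,
-- ) -> List[List[int]]:
--     """
--     Advanced (original semantics): B.start >= A.start and B.start <= A.end + delta.
--     No overlap required. Matches legacy nested-loop behavior.
--     """
--     n = len(programs)
--     out: List[List[int]] = [[] for _ in range(n)]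
--     for i in range(n):
--         cur = programs[i]
--         lo = bisect_left(starts, cur["start"])
--         hi = bisect_right(starts, cur["end"] + delta)
--         for j in range(lo, hi):
--             if j == i:
--                 continue
--             cand = programs[j]
--             if cand["start"] <= cur["end"] + delta:
--                 out[i].append(cand["global_index"])
--     return out
-- ===== SOURCE B (Python) =====
-- def compute_advanced_delta_neighbors(programs, starts, delta):
--     """Single linear scan over (index, start) pairs per program: a program j
--     is a neighbor of i when starts[j] falls in [cur.start, cur.end + delta]
--     and its own start is <= cur.end + delta (no bisect window needed)."""
--     out = []
--     for i, cur in enumerate(programs):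
--         lo_val = cur["start"]
--         hi_val = cur["end"] + delta
--         out.append([
--             programs[j]["global_index"]
--             for j, s in enumerate(starts)
--             if j != i and lo_val <= s <= hi_val and programs[j]["start"] <= hi_val
--         ])
--     return out
-- ===== Notes on version B (the rewrite author's own statement) =====
-- stated objective: simpler
-- what changed: Replaces the bisect-left/bisect-right index window plus windowed inner loop by a single direct predicate scan over enumerate(starts) per program (one comprehension, no lo/hi machinery); Pre_ requires the sorted-starts invariant bisect presupposes (when programs is nonempty; on unsorted starts either window is as defensible) and excludes the inputs on which A raises KeyError/IndexError (missing dict keys, window index past programs).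
import Mathlib
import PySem

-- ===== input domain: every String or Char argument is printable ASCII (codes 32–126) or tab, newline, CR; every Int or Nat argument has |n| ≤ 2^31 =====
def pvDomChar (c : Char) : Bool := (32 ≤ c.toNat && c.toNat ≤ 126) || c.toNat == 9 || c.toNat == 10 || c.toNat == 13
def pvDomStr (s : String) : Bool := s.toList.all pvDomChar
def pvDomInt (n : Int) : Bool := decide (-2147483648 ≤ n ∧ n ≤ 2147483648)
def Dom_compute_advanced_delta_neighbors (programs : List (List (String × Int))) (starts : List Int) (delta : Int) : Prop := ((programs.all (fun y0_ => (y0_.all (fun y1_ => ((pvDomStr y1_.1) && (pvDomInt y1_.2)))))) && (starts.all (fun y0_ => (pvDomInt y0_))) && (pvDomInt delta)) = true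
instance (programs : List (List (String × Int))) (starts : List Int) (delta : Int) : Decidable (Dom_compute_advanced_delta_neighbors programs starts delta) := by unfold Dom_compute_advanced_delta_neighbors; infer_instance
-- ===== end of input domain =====

-- B replaces A's bisect-left/bisect-right index window by a single direct predicate
-- scan over enumerate(starts) per program (simpler: no lo/hi machinery).

-- ===== PORT A =====
-- dict accesses cur["start"], cur["end"], cand["start"], cand["global_index"] are first-match
-- association-list lookups; Pre_ guarantees the keys exist, so the `.getD 0` default is never
-- the value A's KeyError path would have produced inside the claimed domain.
def compute_advanced_delta_neighbors (programs : List (List (String × Int))) (starts : List Int) (delta : Int) : List (List Int) :=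
  let n := programs.length
  (List.range n).map (fun i =>
    let cur := programs.getD i []
    let lo := PySem.List.bisectLeft starts ((List.lookup "start" cur).getD 0)
    let hi := PySem.List.bisectRight starts ((List.lookup "end" cur).getD 0 + delta)
    (PySem.List.pyRange (lo : Int) (hi : Int)).foldl (fun row j =>
      if j = (i : Int) then row
      else
        if (List.lookup "start" (PySem.List.pyGetD programs j [])).getD 0 ≤ (List.lookup "end" cur).getD 0 + delta
        then row ++ [(List.lookup "global_index" (PySem.List.pyGetD programs j [])).getD 0]
        else row) [])

-- ===== PORT B =====
def compute_advanced_delta_neighbors_alt (programs : List (List (String × Int))) (starts : List Int) (delta : Int) : List (List Int) :=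
  (PySem.List.enumerate programs).map (fun ic =>
    let loVal := (List.lookup "start" ic.2).getD 0
    let hiVal := (List.lookup "end" ic.2).getD 0 + delta
    (PySem.List.enumerate starts).filterMap (fun js =>
      if js.1 ≠ ic.1 ∧ loVal ≤ js.2 ∧ js.2 ≤ hiVal ∧
         (List.lookup "start" (PySem.List.pyGetD programs js.1 [])).getD 0 ≤ hiVal
      then some ((List.lookup "global_index" (PySem.List.pyGetD programs js.1 [])).getD 0)
      else none))

-- ===== PRECONDITION & SPEC =====
-- Pre_ requires the pipeline invariant A's bisect presupposes — `starts` nondecreasing (when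
-- `programs` is nonempty; bisect is only specified on sorted lists, so either window is as
-- defensible on unsorted input) — and excludes the inputs on which A raises: a visited program
-- dict lacking "start"/"end", a selected neighbor lacking "global_index", or a window index
-- reaching past `programs`.
def Pre_compute_advanced_delta_neighbors (programs : List (List (String × Int))) (starts : List Int) (delta : Int) : Prop :=
  (programs = [] ∨ List.Pairwise (· ≤ ·) starts) ∧
  (∀ p ∈ programs, (List.lookup "start" p).isSome ∧ (List.lookup "end" p).isSome) ∧
  (∀ i : Nat, ∀ _ : i < programs.length, ∀ j : Nat, ∀ _ : j < starts.length,
      ((List.lookup "start" programs[i]).getD 0 ≤ starts[j] ∧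
       starts[j] ≤ (List.lookup "end" programs[i]).getD 0 + delta) →
      j < programs.length ∧
      (j ≠ i → (List.lookup "start" (programs.getD j [])).getD 0 ≤ (List.lookup "end" programs[i]).getD 0 + delta →
        (List.lookup "global_index" (programs.getD j [])).isSome))
instance (programs : List (List (String × Int))) (starts : List Int) (delta : Int) : Decidable (Pre_compute_advanced_delta_neighbors programs starts delta) := by unfold Pre_compute_advanced_delta_neighbors; infer_instance

def pvWitness_compute_advanced_delta_neighbors : (List (List (String × Int))) × List Int × Int :=
  ([[("start", 0), ("end", 1), ("global_index", 5)], [("start", 2), ("end", 3), ("global_index", 7)]], ([0, 2], 0))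

def Spec_compute_advanced_delta_neighbors (programs : List (List (String × Int))) (starts : List Int) (delta : Int) (out : List (List Int)) : Prop := out = compute_advanced_delta_neighbors_alt programs starts delta
instance (programs : List (List (String × Int))) (starts : List Int) (delta : Int) (out : List (List Int)) : Decidable (Spec_compute_advanced_delta_neighbors programs starts delta out) := by unfold Spec_compute_advanced_delta_neighbors; infer_instance

-- ===== CLAIM (what is proved, stated in full; the proofs are below) =====
def Claim_equal_compute_advanced_delta_neighbors : Prop := ∀ (programs : List (List (String × Int))) (starts : List Int) (delta : Int), Dom_compute_advanced_delta_neighbors programs starts delta → Pre_compute_advanced_delta_neighbors programs starts delta → Spec_compute_advanced_delta_neighbors programs starts delta (compute_advanced_delta_neighbors programs starts delta)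

-- ===== LEMMAS AND PROOFS =====

-- a guarded filterMap IS map-after-filter (no such lemma in Mathlib/PySem in this direction)
theorem pv_filterMap_guard {α β : Type} (P : α → Prop) [DecidablePred P] (f : α → β) (l : List α) :
    l.filterMap (fun a => if P a then some (f a) else none) = (l.filter (fun a => decide (P a))).map f := by
  induction l with
  | nil => rfl
  | cons x xs ih => by_cases h : P x <;> simp [h, ih]

-- one row of A (the bisect window walk) equals one row of B (the direct predicate scan),
-- abstracted over the per-candidate data pst/gi and the interval ends lov/hiv
theorem pv_row_eq (starts : List Int) (hs : List.Pairwise (· ≤ ·) starts)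
    (lov hiv : Int) (i : Int) (pst gi : Int → Int) :
    (PySem.List.pyRange ((PySem.List.bisectLeft starts lov : Nat) : Int) ((PySem.List.bisectRight starts hiv : Nat) : Int)).foldl
      (fun row j => if j = i then row else if pst j ≤ hiv then row ++ [gi j] else row) []
    = (PySem.List.enumerate starts).filterMap (fun js =>
        if js.1 ≠ i ∧ lov ≤ js.2 ∧ js.2 ≤ hiv ∧ pst js.1 ≤ hiv
        then some (gi js.1) else none) := by
  obtain ⟨hL1, hL2, hL3⟩ := PySem.List.bisectLeft_spec starts lov hs
  obtain ⟨hR1, hR2, hR3⟩ := PySem.List.bisectRight_spec starts hiv hs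
  set lo := PySem.List.bisectLeft starts lov with hlo
  set hi := PySem.List.bisectRight starts hiv with hhi
  -- A's loop body as an append-if step, then as a guarded filterMap
  have hstep : (fun (row : List Int) (j : Int) => if j = i then row else if pst j ≤ hiv then row ++ [gi j] else row)
      = (fun row j => if (decide (j ≠ i ∧ pst j ≤ hiv)) = true then row ++ [gi j] else row) := by
    funext row j
    by_cases h1 : j = i <;> by_cases h2 : pst j ≤ hiv <;> simp [h1, h2]
  rw [hstep, PySem.List.foldl_append_if, List.nil_append]
  rw [← pv_filterMap_guard (fun j : Int => j ≠ i ∧ pst j ≤ hiv) gi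
      (PySem.List.pyRange (lo : Int) (hi : Int))]
  -- B's row as a filterMap over the index range 0..len(starts)
  rw [PySem.List.enumerate_eq_map_pyRange starts 0, List.filterMap_map]
  -- the interval test on values is the window test on indices
  have key : ∀ (k : Nat), ∀ (hk : k < starts.length),
      ((lov ≤ starts[k] ∧ starts[k] ≤ hiv) ↔ ((lo : Int) ≤ (k : Int) ∧ (k : Int) < (hi : Int))) := by
    intro k hk
    constructor
    · rintro ⟨h1, h2⟩
      refine ⟨?_, ?_⟩
      · by_contra h
        have hkl : k < lo := by omega
        have := hL2 k hk hkl
        omega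
      · by_contra h
        have hkh : hi ≤ k := by omega
        have := hR3 k hk hkh
        omega
    · rintro ⟨h1, h2⟩
      exact ⟨hL3 k hk (by omega), hR2 k hk (by omega)⟩
  -- rewrite every element's guard to the index-window form
  have hcongr : (PySem.List.pyRange 0 (PySem.List.len starts)).filterMap
        (fun j => if (j, PySem.List.pyGetD starts j 0).1 ≠ i ∧ lov ≤ (j, PySem.List.pyGetD starts j 0).2 ∧
            (j, PySem.List.pyGetD starts j 0).2 ≤ hiv ∧ pst (j, PySem.List.pyGetD starts j 0).1 ≤ hiv
          then some (gi (j, PySem.List.pyGetD starts j 0).1) else none)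
      = (PySem.List.pyRange 0 (PySem.List.len starts)).filterMap
        (fun j => if j ≠ i ∧ (lo : Int) ≤ j ∧ j < (hi : Int) ∧ pst j ≤ hiv then some (gi j) else none) := by
    apply List.filterMap_congr
    intro j hj
    rw [PySem.List.mem_pyRange_one] at hj
    obtain ⟨hj0, hjlen⟩ := hj
    obtain ⟨k, rfl⟩ := Int.eq_ofNat_of_zero_le hj0
    have hklen : k < starts.length := by
      have : (PySem.List.len starts) = (starts.length : Int) := by simp [PySem.List.len]
      omega
    have hget : PySem.List.pyGetD starts ((k : Nat) : Int) 0 = starts[k] := by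
      rw [PySem.List.pyGetD_natCast]
      exact List.getD_eq_getElem starts 0 hklen
    simp only [hget]
    have hiff : (((k : Nat) : Int) ≠ i ∧ lov ≤ starts[k] ∧ starts[k] ≤ hiv ∧ pst ((k : Nat) : Int) ≤ hiv) ↔
        (((k : Nat) : Int) ≠ i ∧ (lo : Int) ≤ ((k : Nat) : Int) ∧ ((k : Nat) : Int) < (hi : Int) ∧ pst ((k : Nat) : Int) ≤ hiv) := by
      have hk2 := key k hklen
      tauto
    exact if_congr hiff rfl rfl
  simp only [Function.comp_def]
  rw [hcongr]
  -- split the full index range into [0,lo) ++ [lo,hi) ++ [hi,len) (or the empty-window case)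
  by_cases hlh : lo ≤ hi
  · have hlenI : PySem.List.len starts = (starts.length : Int) := by simp [PySem.List.len]
    have h1 : (0 : Int) ≤ (lo : Int) := Int.natCast_nonneg lo
    have h2 : (lo : Int) ≤ (hi : Int) := by exact_mod_cast hlh
    have h3 : (hi : Int) ≤ PySem.List.len starts := by rw [hlenI]; exact_mod_cast hR1
    rw [PySem.List.pyRange_one_append 0 (lo : Int) (PySem.List.len starts) h1 (le_trans h2 h3),
        PySem.List.pyRange_one_append (lo : Int) (hi : Int) (PySem.List.len starts) h2 h3,
        List.filterMap_append, List.filterMap_append]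
    have hleft : (PySem.List.pyRange 0 (lo : Int)).filterMap
        (fun j => if j ≠ i ∧ (lo : Int) ≤ j ∧ j < (hi : Int) ∧ pst j ≤ hiv then some (gi j) else none) = [] := by
      rw [List.filterMap_eq_nil_iff]
      intro j hj
      rw [PySem.List.mem_pyRange_one] at hj
      exact if_neg (by rintro ⟨-, h, -, -⟩; omega)
    have hright : (PySem.List.pyRange (hi : Int) (PySem.List.len starts)).filterMap
        (fun j => if j ≠ i ∧ (lo : Int) ≤ j ∧ j < (hi : Int) ∧ pst j ≤ hiv then some (gi j) else none) = [] := by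
      rw [List.filterMap_eq_nil_iff]
      intro j hj
      rw [PySem.List.mem_pyRange_one] at hj
      exact if_neg (by rintro ⟨-, -, h, -⟩; omega)
    rw [hleft, hright, List.nil_append, List.append_nil]
    apply List.filterMap_congr
    intro j hj
    rw [PySem.List.mem_pyRange_one] at hj
    have hiff2 : (j ≠ i ∧ pst j ≤ hiv) ↔ (j ≠ i ∧ (lo : Int) ≤ j ∧ j < (hi : Int) ∧ pst j ≤ hiv) := by
      constructor
      · rintro ⟨ha, hb⟩
        exact ⟨ha, hj.1, hj.2, hb⟩
      · rintro ⟨ha, -, -, hb⟩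
        exact ⟨ha, hb⟩
    exact if_congr hiff2 rfl rfl
  · -- empty window: A iterates nothing, B's guard is unsatisfiable
    have hA : PySem.List.pyRange (lo : Int) (hi : Int) = [] := by
      have : ¬ ((lo : Int) < (hi : Int)) := by exact_mod_cast fun h => hlh (Nat.le_of_lt (by exact_mod_cast h))
      simp [PySem.List.pyRange, this]
    rw [hA, List.filterMap_nil]
    rw [eq_comm, List.filterMap_eq_nil_iff]
    intro j _
    exact if_neg (by rintro ⟨-, h1, h2, -⟩; omega)

-- ===== VERDICT (by name: the statement is the Claim_ definition above) =====
theorem compute_advanced_delta_neighbors_spec : Claim_equal_compute_advanced_delta_neighbors := by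
  intro programs starts delta _hdom hpre
  obtain ⟨hse, -, -⟩ := hpre  -- the key/window clauses only exclude A's KeyError/IndexError inputs
  unfold Spec_compute_advanced_delta_neighbors
  unfold compute_advanced_delta_neighbors compute_advanced_delta_neighbors_alt
  apply List.ext_getElem
  · simp [PySem.List.length_enumerate]
  · intro k h1 h2
    simp only [List.getElem_map, List.getElem_range, PySem.List.getElem_enumerate, zero_add]
    have hk : k < programs.length := by simpa using h1
    have hs : List.Pairwise (· ≤ ·) starts := by
      rcases hse with h | hs
      · rw [h] at hk
        exact absurd hk (by simp)
      · exact hs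
    have hgetD : programs.getD k [] = programs[k] := List.getD_eq_getElem programs [] hk
    rw [hgetD]
    exact pv_row_eq starts hs _ _ (k : Int)
      (fun j => (List.lookup "start" (PySem.List.pyGetD programs j [])).getD 0)
      (fun j => (List.lookup "global_index" (PySem.List.pyGetD programs j [])).getD 0)
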